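-- pv_equiv track=rewrite | github.com/tldnjs324/python_CodingTest | 프로그래머스/lv2/양궁대회.py | solution
-- ===== SOURCE A (Python) =====
-- def solution(n, info):
--     answer = [0] * 11
--     arr = [0] * 11
--     maxDiff = 0
--
--     for subset in range(1, 1 << 10):
--         ryan = 0
--         peach = 0
--         cnt = 0
--
--         for i in range(10):
--             if subset & (1 << i):
--                 ryan += 10 - i
--                 arr[i] = info[i] + 1
--                 cnt += arr[i]
--             else:
--                 arr[i] = 0
--                 if info[i]:
--                     peach += 10 - i
--
--         if cnt > n: continue
--
--         arr[10] = n - cnt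
--
--         if ryan - peach == maxDiff:
--             for j in reversed(range(11)):
--                 if arr[j] > answer[j]:
--                     maxDiff = ryan - peach
--                     answer = arr[:]
--                     break
--                 elif arr[j] < answer[j]:
--                     break
--
--         elif ryan - peach > maxDiff:
--             maxDiff = ryan - peach
--             answer = arr[:]
--
--     if maxDiff == 0:
--         answer = [-1]
--     return answer
-- ===== SOURCE B (Python) =====
-- def solution(n, info):
--     def better(arr, answer):
--         for j in range(10, -1, -1):
--             if arr[j] != answer[j]:
--                 return arr[j] > answer[j]
--         return False
--
--     def rec(i, ryan, peach, cnt, arr, maxDiff, answer):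
--         if i == 0:
--             if cnt > n:
--                 return maxDiff, answer
--             cand = arr + [n - cnt]
--             diff = ryan - peach
--             if diff > maxDiff:
--                 return diff, cand
--             if diff == maxDiff and better(cand, answer):
--                 return diff, cand
--             return maxDiff, answer
--         r = i - 1
--         v = info[r]
--         maxDiff, answer = rec(r, ryan, peach + (10 - r) if v else peach, cnt, [0] + arr, maxDiff, answer)
--         return rec(r, ryan + (10 - r), peach, cnt + v + 1, [v + 1] + arr, maxDiff, answer)
--
--     maxDiff, answer = rec(10, 0, 0, 0, [], 0, [0] * 11)
--     return [-1] if maxDiff == 0 else answer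
-- ===== Notes on version B (the rewrite author's own statement) =====
-- stated objective: alternative
-- what changed: Replaces A's flat sweep over all 2^10 bitmasks (each re-running an inner 10-ring scoring loop and mutating a shared arr) with a recursive backtracking over rings 9..0 that threads the partial ryan/peach/cnt scores and the partial distribution through the recursion, evaluating each complete candidate at the leaf with the same keep/replace rule.
-- outside the precondition, e.g. on solution(5, [1, 2]): A raises IndexError, B raises IndexError
import Mathlib
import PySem

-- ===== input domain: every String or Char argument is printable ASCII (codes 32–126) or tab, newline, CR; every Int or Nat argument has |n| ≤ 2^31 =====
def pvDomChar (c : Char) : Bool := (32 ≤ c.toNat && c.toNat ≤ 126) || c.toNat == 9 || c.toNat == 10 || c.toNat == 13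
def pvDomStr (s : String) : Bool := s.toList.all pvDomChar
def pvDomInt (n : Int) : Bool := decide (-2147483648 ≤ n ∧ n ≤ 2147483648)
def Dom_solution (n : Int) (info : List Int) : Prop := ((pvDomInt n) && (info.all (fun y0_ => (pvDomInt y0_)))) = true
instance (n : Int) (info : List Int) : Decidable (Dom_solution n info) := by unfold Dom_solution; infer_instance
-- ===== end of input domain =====

-- B replaces A's 2^10 bitmask sweep by recursive backtracking over the ten rings that threads the
-- partial score/arrow accumulators and the running best through the recursion (objective: alternative).

-- shared accessor for info[i] (i = 0..9, nonnegative by construction; exact on in-range indices,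
-- out-of-range indices are an IndexError in Python and are excluded by Pre_solution)
def infoD (info : List Int) (i : Nat) : Int := (PySem.List.pyGet? info (i : Int)).getD 0

-- ===== PORT A =====
-- the inner 'for j in reversed(range(11))' tie-break loop with its two breaks
def aTie (arr answer : List Int) (diff maxDiff : Int) : List Nat → Int × List Int
  | [] => (maxDiff, answer)
  | j :: rest =>
    if arr.getD j 0 > answer.getD j 0 then (diff, arr)
    else if arr.getD j 0 < answer.getD j 0 then (maxDiff, answer)
    else aTie arr answer diff maxDiff rest

-- one step of the inner 'for i in range(10)' loop (state: ryan, peach, cnt, arr)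
def aInner (info : List Int) (subset : Nat) (st : Int × Int × Int × List Int) (i : Nat) :
    Int × Int × Int × List Int :=
  let (ryan, peach, cnt, arr) := st
  if subset.testBit i then
    let v := infoD info i + 1
    (ryan + ((10 : Int) - (i : Int)), peach, cnt + v, arr.set i v)
  else
    (ryan, if infoD info i ≠ 0 then peach + ((10 : Int) - (i : Int)) else peach, cnt, arr.set i 0)

-- one iteration of the outer 'for subset in range(1, 1 << 10)' loop (state: maxDiff, answer, arr)
def aStep (n : Int) (info : List Int) (st : Int × List Int × List Int) (subset : Nat) :
    Int × List Int × List Int :=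
  let maxDiff := st.1
  let answer := st.2.1
  let arr := st.2.2
  let r4 := (List.range 10).foldl (aInner info subset) (0, 0, 0, arr)
  let ryan := r4.1
  let peach := r4.2.1
  let cnt := r4.2.2.1
  let arr1 := r4.2.2.2
  if cnt > n then (maxDiff, answer, arr1)
  else
    let arr2 := arr1.set 10 (n - cnt)
    if ryan - peach = maxDiff then
      let t := aTie arr2 answer (ryan - peach) maxDiff [10, 9, 8, 7, 6, 5, 4, 3, 2, 1, 0]
      (t.1, t.2, arr2)
    else if ryan - peach > maxDiff then (ryan - peach, arr2, arr2)
    else (maxDiff, answer, arr2)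

def solution (n : Int) (info : List Int) : List Int :=
  let st := (List.range' 1 1023).foldl (aStep n info) (0, List.replicate 11 0, List.replicate 11 0)
  let maxDiff := st.1
  let answer := st.2.1
  if maxDiff = 0 then [-1] else answer

-- ===== PORT B =====
-- 'better': first differing position scanning j = 10 .. 0 decides
def bBetter (arr answer : List Int) : List Nat → Bool
  | [] => false
  | j :: rest =>
    if arr.getD j 0 ≠ answer.getD j 0 then decide (arr.getD j 0 > answer.getD j 0)
    else bBetter arr answer rest

-- base case of the backtracking: all ten rings decided, spend the leftover arrows on ring 10
def bLeaf (n ryan peach cnt : Int) (arr : List Int) (st : Int × List Int) : Int × List Int :=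
  let maxDiff := st.1
  let answer := st.2
  if cnt > n then (maxDiff, answer)
  else
    let cand := arr ++ [n - cnt]
    let diff := ryan - peach
    if diff > maxDiff then (diff, cand)
    else if diff = maxDiff ∧ bBetter cand answer [10, 9, 8, 7, 6, 5, 4, 3, 2, 1, 0] then (diff, cand)
    else (maxDiff, answer)

-- backtracking over rings: at level r+1 decide ring r (concede first, then win with info[r]+1 arrows),
-- threading (maxDiff, answer) through the recursion
def bRec (n : Int) (info : List Int) :
    Nat → Int → Int → Int → List Int → Int × List Int → Int × List Int
  | 0, ryan, peach, cnt, arr, st => bLeaf n ryan peach cnt arr st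
  | r + 1, ryan, peach, cnt, arr, st =>
    let v := infoD info r
    let st1 := bRec n info r ryan
      (if v ≠ 0 then peach + ((10 : Int) - (r : Int)) else peach) cnt (0 :: arr) st
    bRec n info r (ryan + ((10 : Int) - (r : Int))) peach (cnt + v + 1) ((v + 1) :: arr) st1

def solution_alt (n : Int) (info : List Int) : List Int :=
  let st := bRec n info 10 0 0 0 [] (0, List.replicate 11 0)
  let maxDiff := st.1
  let answer := st.2
  if maxDiff = 0 then [-1] else answer

-- ===== PRECONDITION & SPEC =====
-- Pre_ excludes only the inputs where the Python A raises IndexError (info shorter than 10 entries).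
def Pre_solution (n : Int) (info : List Int) : Prop := 10 ≤ info.length
instance (n : Int) (info : List Int) : Decidable (Pre_solution n info) := by
  unfold Pre_solution; infer_instance

def pvWitness_solution : Int × List Int := (5, [2, 1, 1, 1, 0, 0, 0, 0, 0, 0])

def Spec_solution (n : Int) (info : List Int) (out : List Int) : Prop := out = solution_alt n info
instance (n : Int) (info : List Int) (out : List Int) : Decidable (Spec_solution n info out) := by
  unfold Spec_solution; infer_instance

-- ===== CLAIM (what is proved, stated in full; the proofs are below) =====
def Claim_equal_solution : Prop :=
  ∀ (n : Int) (info : List Int), Dom_solution n info → Pre_solution n info →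
    Spec_solution n info (solution n info)

-- ===== LEMMAS AND PROOFS =====

-- closed-form accumulators of a subset s restricted to rings 0..k-1
def ryanOf (s : Nat) (k : Nat) : Int :=
  ((List.range k).map (fun i => if s.testBit i then (10 : Int) - (i : Int) else 0)).sum

def peachOf (info : List Int) (s : Nat) (k : Nat) : Int :=
  ((List.range k).map (fun i =>
    if s.testBit i then 0 else if infoD info i ≠ 0 then (10 : Int) - (i : Int) else 0)).sum

def cntOf (info : List Int) (s : Nat) (k : Nat) : Int :=
  ((List.range k).map (fun i => if s.testBit i then infoD info i + 1 else 0)).sum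

def arrOf (info : List Int) (s : Nat) (k : Nat) : List Int :=
  (List.range k).map (fun i => if s.testBit i then infoD info i + 1 else 0)

-- the evaluation of one candidate subset against the running (maxDiff, answer)
def leafEval (n : Int) (info : List Int) (st : Int × List Int) (s : Nat) : Int × List Int :=
  bLeaf n (ryanOf s 10) (peachOf info s 10) (cntOf info s 10) (arrOf info s 10) st

theorem length_arrOf (info : List Int) (s k : Nat) : (arrOf info s k).length = k := by
  simp [arrOf]

-- peeling ring k off the closed forms
theorem ryanOf_succ (s k : Nat) :
    ryanOf s (k + 1) = ryanOf s k + (if s.testBit k then (10 : Int) - (k : Int) else 0) := by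
  simp [ryanOf, List.range_succ]

theorem peachOf_succ (info : List Int) (s k : Nat) :
    peachOf info s (k + 1) = peachOf info s k +
      (if s.testBit k then 0 else if infoD info k ≠ 0 then (10 : Int) - (k : Int) else 0) := by
  simp [peachOf, List.range_succ]

theorem cntOf_succ (info : List Int) (s k : Nat) :
    cntOf info s (k + 1) = cntOf info s k + (if s.testBit k then infoD info k + 1 else 0) := by
  simp [cntOf, List.range_succ]

theorem arrOf_succ (info : List Int) (s k : Nat) :
    arrOf info s (k + 1) = arrOf info s k ++ [if s.testBit k then infoD info k + 1 else 0] := by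
  simp [arrOf, List.range_succ]

-- bits below r of 2^r + s (s < 2^r) agree with s, bit r is set
theorem testBit_lo {s r : Nat} (hs : s < 2 ^ r) {j : Nat} (hj : j < r) :
    (2 ^ r + s).testBit j = s.testBit j :=
  Nat.testBit_two_pow_add_gt hj s

theorem testBit_hi {s r : Nat} (hs : s < 2 ^ r) : (2 ^ r + s).testBit r = true := by
  rw [Nat.testBit_two_pow_add_eq, Nat.testBit_lt_two_pow hs]; rfl

theorem ryanOf_lo {s r : Nat} (hs : s < 2 ^ r) : ryanOf s (r + 1) = ryanOf s r := by
  rw [ryanOf_succ, Nat.testBit_lt_two_pow hs]; simp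

theorem peachOf_lo (info : List Int) {s r : Nat} (hs : s < 2 ^ r) :
    peachOf info s (r + 1) = peachOf info s r +
      (if infoD info r ≠ 0 then (10 : Int) - (r : Int) else 0) := by
  rw [peachOf_succ, Nat.testBit_lt_two_pow hs]; simp

theorem cntOf_lo (info : List Int) {s r : Nat} (hs : s < 2 ^ r) :
    cntOf info s (r + 1) = cntOf info s r := by
  rw [cntOf_succ, Nat.testBit_lt_two_pow hs]; simp

theorem arrOf_lo (info : List Int) {s r : Nat} (hs : s < 2 ^ r) :
    arrOf info s (r + 1) = arrOf info s r ++ [0] := by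
  rw [arrOf_succ, Nat.testBit_lt_two_pow hs]; simp

theorem ryanOf_hi {s r : Nat} (hs : s < 2 ^ r) :
    ryanOf (2 ^ r + s) (r + 1) = ryanOf s r + ((10 : Int) - (r : Int)) := by
  rw [ryanOf_succ, testBit_hi hs]
  simp only [if_true, ryanOf]
  congr 2
  exact List.map_congr_left fun j hj => by rw [testBit_lo hs (List.mem_range.mp hj)]

theorem peachOf_hi (info : List Int) {s r : Nat} (hs : s < 2 ^ r) :
    peachOf info (2 ^ r + s) (r + 1) = peachOf info s r := by
  rw [peachOf_succ, testBit_hi hs]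
  simp only [if_true, add_zero, peachOf]
  congr 1
  exact List.map_congr_left fun j hj => by rw [testBit_lo hs (List.mem_range.mp hj)]

theorem cntOf_hi (info : List Int) {s r : Nat} (hs : s < 2 ^ r) :
    cntOf info (2 ^ r + s) (r + 1) = cntOf info s r + (infoD info r + 1) := by
  rw [cntOf_succ, testBit_hi hs]
  simp only [if_true, cntOf]
  congr 2
  exact List.map_congr_left fun j hj => by rw [testBit_lo hs (List.mem_range.mp hj)]

theorem arrOf_hi (info : List Int) {s r : Nat} (hs : s < 2 ^ r) :
    arrOf info (2 ^ r + s) (r + 1) = arrOf info s r ++ [infoD info r + 1] := by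
  rw [arrOf_succ, testBit_hi hs]
  simp only [if_true, arrOf]
  congr 1
  exact List.map_congr_left fun j hj => by rw [testBit_lo hs (List.mem_range.mp hj)]

-- ===== characterising B: the backtracking is a fold of leaf evaluations over all 2^r subsets =====
theorem bRec_eq_foldl (n : Int) (info : List Int) (r : Nat) :
    ∀ (ryan peach cnt : Int) (arr : List Int) (st : Int × List Int),
      bRec n info r ryan peach cnt arr st =
        (List.range (2 ^ r)).foldl
          (fun st s => bLeaf n (ryan + ryanOf s r) (peach + peachOf info s r)
            (cnt + cntOf info s r) (arrOf info s r ++ arr) st) st := by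
  induction r with
  | zero =>
    intro ryan peach cnt arr st
    simp [bRec, ryanOf, peachOf, cntOf, arrOf, pow_zero, List.range_one, List.range_zero]
  | succ r ih =>
    intro ryan peach cnt arr st
    have hsplit : List.range (2 ^ (r + 1)) =
        List.range (2 ^ r) ++ (List.range (2 ^ r)).map (fun s => 2 ^ r + s) := by
      rw [pow_succ, Nat.mul_two, List.range_add]
    rw [bRec]
    rw [hsplit, List.foldl_append, List.foldl_map]
    -- low half = concede branch
    have hlow : ∀ (st : Int × List Int),
        bRec n info r ryan
          (if infoD info r ≠ 0 then peach + ((10 : Int) - (r : Int)) else peach) cnt (0 :: arr) st =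
        (List.range (2 ^ r)).foldl
          (fun st s => bLeaf n (ryan + ryanOf s (r + 1)) (peach + peachOf info s (r + 1))
            (cnt + cntOf info s (r + 1)) (arrOf info s (r + 1) ++ arr) st) st := by
      intro st
      rw [ih]
      refine PySem.List.foldl_congr_mem _ _ _ _ ?_
      intro acc s hs
      have hs' := List.mem_range.mp hs
      rw [ryanOf_lo hs', peachOf_lo info hs', cntOf_lo info hs', arrOf_lo info hs']
      have harr : arrOf info s r ++ [(0 : Int)] ++ arr = arrOf info s r ++ (0 :: arr) := by
        simp
      rw [harr]
      by_cases hv : infoD info r ≠ 0 <;> simp [hv] <;> ring_nf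
    -- high half = win branch
    have hhigh : ∀ (st : Int × List Int),
        bRec n info r (ryan + ((10 : Int) - (r : Int))) peach (cnt + infoD info r + 1)
          ((infoD info r + 1) :: arr) st =
        (List.range (2 ^ r)).foldl
          (fun st s => bLeaf n (ryan + ryanOf (2 ^ r + s) (r + 1))
            (peach + peachOf info (2 ^ r + s) (r + 1)) (cnt + cntOf info (2 ^ r + s) (r + 1))
            (arrOf info (2 ^ r + s) (r + 1) ++ arr) st) st := by
      intro st
      rw [ih]
      refine PySem.List.foldl_congr_mem _ _ _ _ ?_
      intro acc s hs
      have hs' := List.mem_range.mp hs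
      rw [ryanOf_hi hs', peachOf_hi info hs', cntOf_hi info hs', arrOf_hi info hs']
      have harr : arrOf info s r ++ [infoD info r + 1] ++ arr =
          arrOf info s r ++ ((infoD info r + 1) :: arr) := by simp
      rw [harr]
      ring_nf
    rw [hlow, hhigh]

theorem solution_alt_eq_fold (n : Int) (info : List Int) :
    solution_alt n info =
      (if ((List.range 1024).foldl (leafEval n info) (0, List.replicate 11 0)).1 = 0 then [-1]
       else ((List.range 1024).foldl (leafEval n info) (0, List.replicate 11 0)).2) := by
  unfold solution_alt
  show (if (bRec n info 10 0 0 0 [] (0, List.replicate 11 0)).1 = 0 then [-1]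
        else (bRec n info 10 0 0 0 [] (0, List.replicate 11 0)).2) = _
  rw [bRec_eq_foldl]
  have : (List.range (2 ^ 10)).foldl
      (fun st s => bLeaf n (0 + ryanOf s 10) (0 + peachOf info s 10) (0 + cntOf info s 10)
        (arrOf info s 10 ++ []) st) ((0 : Int), List.replicate 11 (0 : Int)) =
      (List.range 1024).foldl (leafEval n info) (0, List.replicate 11 0) := by
    refine PySem.List.foldl_congr_mem _ _ _ _ ?_
    intro acc s _
    simp [leafEval]
  rw [this]

-- ===== characterising A: one outer iteration acts as a leaf evaluation on (maxDiff, answer) =====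
theorem aInner_fold (info : List Int) (s : Nat) (arr0 : List Int) (h : arr0.length = 11) :
    ∀ k, k ≤ 10 →
      (List.range k).foldl (aInner info s) (0, 0, 0, arr0) =
        (ryanOf s k, peachOf info s k, cntOf info s k, arrOf info s k ++ arr0.drop k) := by
  intro k
  induction k with
  | zero => intro _; simp [ryanOf, peachOf, cntOf, arrOf, List.range_zero]
  | succ k ih =>
    intro hk
    have hk' : k ≤ 10 := Nat.le_of_succ_le hk
    rw [List.range_succ, List.foldl_append, ih hk']
    have hklt : k < arr0.length := by omega
    have hdrop : arr0.drop k = arr0[k] :: arr0.drop (k + 1) := List.drop_eq_getElem_cons hklt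
    have hlen : (arrOf info s k).length = k := length_arrOf info s k
    have hset : ∀ (v : Int), (arrOf info s k ++ arr0.drop k).set k v =
        arrOf info s k ++ ([v] ++ arr0.drop (k + 1)) := by
      intro v
      rw [List.set_append_right _ _ (le_of_eq hlen), hlen, Nat.sub_self, hdrop]
      rfl
    simp only [List.foldl_cons, List.foldl_nil, aInner]
    by_cases hb : s.testBit k
    · simp only [hb, if_true]
      rw [hset, ryanOf_succ, peachOf_succ, cntOf_succ, arrOf_succ, hb]
      simp
    · simp only [hb, Bool.false_eq_true, if_false]
      rw [hset, ryanOf_succ, peachOf_succ, cntOf_succ, arrOf_succ]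
      simp only [hb, Bool.false_eq_true, if_false]
      by_cases hv : infoD info k ≠ 0 <;> simp [hv]

-- the tie-break scan equals 'if better then replace else keep'
theorem aTie_eq_bBetter (arr answer : List Int) (diff maxDiff : Int) (js : List Nat) :
    aTie arr answer diff maxDiff js =
      if bBetter arr answer js then (diff, arr) else (maxDiff, answer) := by
  induction js with
  | nil => simp [aTie, bBetter]
  | cons j rest ih =>
    simp only [aTie, bBetter, List.getD_eq_getElem?_getD]
    rcases lt_trichotomy (arr[j]?.getD 0) (answer[j]?.getD 0) with h | h | h
    · have hne : arr[j]?.getD 0 ≠ answer[j]?.getD 0 := by omega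
      have hng : ¬ answer[j]?.getD 0 < arr[j]?.getD 0 := by omega
      simp [hne, hng, h]
    · have hne : ¬ arr[j]?.getD 0 ≠ answer[j]?.getD 0 := by omega
      have hng : ¬ answer[j]?.getD 0 < arr[j]?.getD 0 := by omega
      have hnl : ¬ arr[j]?.getD 0 < answer[j]?.getD 0 := by omega
      simp only [if_neg hng, if_neg hnl, if_neg hne]
      exact ih
    · have hne : arr[j]?.getD 0 ≠ answer[j]?.getD 0 := by omega
      simp [hne, h]

theorem aStep_proj (n : Int) (info : List Int) (m : Int) (a arr : List Int)
    (h : arr.length = 11) (s : Nat) :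
    (aStep n info (m, a, arr) s).1 = (leafEval n info (m, a) s).1 ∧
    (aStep n info (m, a, arr) s).2.1 = (leafEval n info (m, a) s).2 ∧
    (aStep n info (m, a, arr) s).2.2.length = 11 := by
  have hfold := aInner_fold info s arr h 10 (le_refl 10)
  have hdrop : arr.drop 10 = [arr.getD 10 0] := by
    have h10 : (10 : Nat) < arr.length := by omega
    rw [List.drop_eq_getElem_cons h10]
    have : arr.drop 11 = [] := List.drop_eq_nil_of_le (by omega)
    simp [this, List.getD_eq_getElem?_getD, List.getElem?_eq_getElem h10]
  have hlen : (arrOf info s 10).length = 10 := length_arrOf info s 10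
  have hset : (arrOf info s 10 ++ arr.drop 10).set 10 (n - cntOf info s 10) =
      arrOf info s 10 ++ [n - cntOf info s 10] := by
    rw [hdrop, List.set_append_right _ _ (le_of_eq hlen)]
    simp [hlen]
  simp only [aStep, leafEval, bLeaf]
  rw [hfold]
  by_cases hcnt : cntOf info s 10 > n
  · simp [hcnt, h, hlen]
  · simp only [hcnt, if_false]
    rw [hset]
    set diff := ryanOf s 10 - peachOf info s 10 with hdiff
    set cand := arrOf info s 10 ++ [n - cntOf info s 10] with hcand
    have hclen : cand.length = 11 := by simp [hcand, hlen]
    by_cases he : diff = m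
    · simp only [he, if_true]
      rw [aTie_eq_bBetter]
      by_cases hb : bBetter cand a [10, 9, 8, 7, 6, 5, 4, 3, 2, 1, 0]
      · simp [hb, he, hclen, lt_irrefl]
      · simp [hb, he, hclen, lt_irrefl]
    · simp only [he, if_false]
      by_cases hg : diff > m
      · simp [hg, hclen, he]
      · simp [hg, hclen]

-- transfer: folding A's step and folding leaf evaluations agree on (maxDiff, answer)
theorem fold_transfer (n : Int) (info : List Int) (l : List Nat) :
    ∀ (m : Int) (a arr : List Int), arr.length = 11 →
      ((l.foldl (aStep n info) (m, a, arr)).1, (l.foldl (aStep n info) (m, a, arr)).2.1) =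
        l.foldl (leafEval n info) (m, a) := by
  induction l with
  | nil => intro m a arr _; simp
  | cons s rest ih =>
    intro m a arr harr
    obtain ⟨h1, h2, h3⟩ := aStep_proj n info m a arr harr s
    simp only [List.foldl_cons]
    have hstep : aStep n info (m, a, arr) s =
        ((leafEval n info (m, a) s).1, (leafEval n info (m, a) s).2,
          (aStep n info (m, a, arr) s).2.2) := by
      cases hst : aStep n info (m, a, arr) s with
      | mk x yz =>
        cases yz with
        | mk y z =>
          rw [hst] at h1 h2
          simp at h1 h2
          simp [h1, h2]
    rw [hstep]
    have := ih (leafEval n info (m, a) s).1 (leafEval n info (m, a) s).2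
      (aStep n info (m, a, arr) s).2.2 h3
    simpa using this

-- ===== the subset-0 leaf is absorbed by the subset-1 leaf =====
theorem peachOf_zero_pos (info : List Int) (i : Nat) (hi : i < 10) (hv : infoD info i ≠ 0) :
    0 < peachOf info 0 10 := by
  have hterm : ((10 : Int) - (i : Int)) ∈ (List.range 10).map (fun i =>
      if (0 : Nat).testBit i then 0 else if infoD info i ≠ 0 then (10 : Int) - (i : Int) else 0) := by
    refine List.mem_map.mpr ⟨i, List.mem_range.mpr hi, ?_⟩
    simp [Nat.zero_testBit, hv]
  have hnn : ∀ x ∈ (List.range 10).map (fun i =>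
      if (0 : Nat).testBit i then 0 else if infoD info i ≠ 0 then (10 : Int) - (i : Int) else 0),
      (0 : Int) ≤ x := by
    intro x hx
    simp only [List.mem_map] at hx
    obtain ⟨j, hj, hxe⟩ := hx
    have : j < 10 := List.mem_range.mp hj
    subst hxe
    split_ifs <;> [exact le_refl 0; omega; exact le_refl 0]
  have := List.single_le_sum hnn _ hterm
  have hpos : (0 : Int) < (10 : Int) - (i : Int) := by omega
  calc (0 : Int) < (10 : Int) - (i : Int) := hpos
    _ ≤ _ := this
theorem leaf_zero_absorbed (n : Int) (info : List Int) :
    leafEval n info (leafEval n info (0, List.replicate 11 0) 0) 1 =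
      leafEval n info (0, List.replicate 11 0) 1 := by
  have hryan0 : ryanOf 0 10 = 0 := by
    refine List.sum_eq_zero ?_
    intro x hx
    simp only [List.mem_map] at hx
    obtain ⟨i, _, hxe⟩ := hx
    subst hxe
    simp [Nat.zero_testBit]
  have hcnt0 : cntOf info 0 10 = 0 := by
    refine List.sum_eq_zero ?_
    intro x hx
    simp only [List.mem_map] at hx
    obtain ⟨i, _, hxe⟩ := hx
    subst hxe
    simp [Nat.zero_testBit]
  have harr0 : arrOf info 0 10 = List.replicate 10 0 := by
    simp only [arrOf]
    refine List.eq_replicate_iff.mpr ⟨by simp, ?_⟩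
    intro x hx
    simp only [List.mem_map] at hx
    obtain ⟨i, _, hxe⟩ := hx
    subst hxe
    simp [Nat.zero_testBit]
  by_cases hall : ∀ i, i < 10 → infoD info i = 0
  · -- every ring is empty for peach: subset 0 scores diff = 0
    have hpeach0 : peachOf info 0 10 = 0 := by
      refine List.sum_eq_zero ?_
      intro x hx
      simp only [List.mem_map] at hx
      obtain ⟨i, hi, hxe⟩ := hx
      subst hxe
      simp [Nat.zero_testBit, hall i (List.mem_range.mp hi)]
    have h1ryan : ryanOf 1 10 = 10 := by decide
    have h1peach : peachOf info 1 10 = 0 := by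
      refine List.sum_eq_zero ?_
      intro x hx
      simp only [List.mem_map] at hx
      obtain ⟨i, hi, hxe⟩ := hx
      subst hxe
      by_cases hb : (1 : Nat).testBit i
      · simp [hb]
      · simp [hb, hall i (List.mem_range.mp hi)]
    have h1cnt : cntOf info 1 10 = 1 := by
      have hterms : ∀ i ∈ List.range 10,
          (if (1 : Nat).testBit i then infoD info i + 1 else 0) =
          (if i = 0 then (1 : Int) else 0) := by
        intro i hi
        by_cases hi0 : i = 0
        · subst hi0; simp [hall 0 (by omega)]
        · have hb : (1 : Nat).testBit i = false := by
            cases i with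
            | zero => omega
            | succ j =>
              have h2 : (1 : Nat) < 2 ^ (j + 1) := by
                have : (2 : Nat) ≤ 2 ^ (j + 1) := by
                  calc (2 : Nat) = 2 ^ 1 := rfl
                  _ ≤ 2 ^ (j + 1) := Nat.pow_le_pow_right (by omega) (by omega)
                omega
              exact Nat.testBit_lt_two_pow h2
          simp [hb, hi0]
      simp only [cntOf]
      rw [List.map_congr_left hterms]
      decide
    rcases lt_trichotomy n 0 with hn | hn | hn
    · -- n < 0: subset 0 is skipped (cnt 0 > n)
      have e0 : leafEval n info (0, List.replicate 11 0) 0 = (0, List.replicate 11 0) := by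
        simp only [leafEval, bLeaf, hryan0, hpeach0, hcnt0, harr0]
        rw [if_pos (by omega : (0 : Int) > n)]
      rw [e0]
    · -- n = 0: subset 0 candidate equals the initial answer, no replacement
      subst hn
      have e0 : leafEval 0 info (0, List.replicate 11 0) 0 = (0, List.replicate 11 0) := by
        simp only [leafEval, bLeaf, hryan0, hpeach0, hcnt0, harr0]
        norm_num [bBetter]
      rw [e0]
    · -- n > 0: subset 0 replaces the answer on the tie, but subset 1 wins strictly
      --        from either state and overwrites it
      have e0 : leafEval n info (0, List.replicate 11 0) 0 =
          (0, List.replicate 10 0 ++ [n]) := by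
        simp only [leafEval, bLeaf, hryan0, hpeach0, hcnt0, harr0]
        have hb : bBetter [0, 0, 0, 0, 0, 0, 0, 0, 0, 0, n] [0, 0, 0, 0, 0, 0, 0, 0, 0, 0, 0]
            [10, 9, 8, 7, 6, 5, 4, 3, 2, 1, 0] = true := by
          have hne : n ≠ 0 := by omega
          simp [bBetter, hne, hn]
        rw [if_neg (by omega : ¬ (0 : Int) > n)]
        simp [hb]
      rw [e0]
      simp only [leafEval, bLeaf, h1ryan, h1peach, h1cnt]
      rw [if_neg (by omega : ¬ (1 : Int) > n), if_neg (by omega : ¬ (1 : Int) > n)]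
      norm_num
  · -- some ring would score for peach: subset 0 has diff < 0 and changes nothing
    push Not at hall
    obtain ⟨i, hi, hv⟩ := hall
    have hpos := peachOf_zero_pos info i hi hv
    have hfix : leafEval n info (0, List.replicate 11 0) 0 = (0, List.replicate 11 0) := by
      simp only [leafEval, bLeaf, hryan0, hcnt0]
      by_cases hn0 : (0 : Int) > n
      · rw [if_pos hn0]
      · rw [if_neg hn0]
        have h1 : ¬ ((0 : Int) - peachOf info 0 10 > 0) := by omega
        have h2 : ¬ ((0 : Int) - peachOf info 0 10 = 0 ∧ bBetter
            (arrOf info 0 10 ++ [n - 0]) (List.replicate 11 0)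
            [10, 9, 8, 7, 6, 5, 4, 3, 2, 1, 0]) := by
          intro hc
          omega
        rw [if_neg h1, if_neg h2]
    rw [hfix]

-- ===== VERDICT (by name: the statement is the Claim_ definition above) =====
theorem solution_spec : Claim_equal_solution := by
  intro n info _ _
  unfold Spec_solution
  have h2 := fold_transfer n info (List.range' 1 1023) 0 (List.replicate 11 0)
    (List.replicate 11 0) (by simp)
  have ha := congrArg Prod.fst h2
  have hb := congrArg Prod.snd h2
  simp only [] at ha hb
  -- A as a fold of leaf evaluations over subsets 1..1023
  have hA : solution n info =
      (if ((List.range' 1 1023).foldl (leafEval n info) (0, List.replicate 11 0)).1 = 0 then [-1]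
       else ((List.range' 1 1023).foldl (leafEval n info) (0, List.replicate 11 0)).2) := by
    unfold solution
    show (if ((List.range' 1 1023).foldl (aStep n info)
            (0, List.replicate 11 0, List.replicate 11 0)).1 = 0 then [-1]
          else ((List.range' 1 1023).foldl (aStep n info)
            (0, List.replicate 11 0, List.replicate 11 0)).2.1) = _
    rw [ha, hb]
  -- B is the same fold with the extra (absorbed) subset 0 in front
  have hfold : (List.range 1024).foldl (leafEval n info) (0, List.replicate 11 0) =
      (List.range' 1 1023).foldl (leafEval n info) (0, List.replicate 11 0) := by
    have hr : List.range 1024 = 0 :: List.range' 1 1023 := by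
      rw [List.range_eq_range']
      rfl
    have hr2 : List.range' 1 1023 = 1 :: List.range' 2 1022 := rfl
    rw [hr, hr2]
    simp only [List.foldl_cons]
    exact congrArg (fun st => (List.range' 2 1022).foldl (leafEval n info) st)
      (leaf_zero_absorbed n info)
  have hB : solution_alt n info =
      (if ((List.range' 1 1023).foldl (leafEval n info) (0, List.replicate 11 0)).1 = 0 then [-1]
       else ((List.range' 1 1023).foldl (leafEval n info) (0, List.replicate 11 0)).2) := by
    rw [solution_alt_eq_fold, hfold]
  rw [hA, hB]
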